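-- pv_equiv track=rewrite | github.com/goldenstein64/DailyInterviewPro | solutions/_2025/_10_october/_14_int_longest_run.py | longest_run
-- ===== SOURCE A (Python) =====
-- def longest_run(n: int) -> int:
--     result: int = 0
--     current: int = 0
--     while n > 0:
--         if n % 2 == 1:
--             current += 1
--         else:
--             result = max(result, current)
--             current = 0
--
--         n //= 2
--
--     return max(result, current)
-- ===== SOURCE B (Python) =====
-- def longest_run(n: int) -> int:
--     count = 0
--     while n > 0:
--         n &= n >> 1
--         count += 1
--     return count
-- ===== Notes on version B (the rewrite author's own statement) =====
-- stated objective: alternative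
-- what changed: Replaces the bit-by-bit scan with result/current accumulators by the AND-shift trick: repeatedly n &= n >> 1 and count iterations until n becomes 0; each step shortens every run of 1-bits by one, so the iteration count is the longest run.
import Mathlib
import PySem

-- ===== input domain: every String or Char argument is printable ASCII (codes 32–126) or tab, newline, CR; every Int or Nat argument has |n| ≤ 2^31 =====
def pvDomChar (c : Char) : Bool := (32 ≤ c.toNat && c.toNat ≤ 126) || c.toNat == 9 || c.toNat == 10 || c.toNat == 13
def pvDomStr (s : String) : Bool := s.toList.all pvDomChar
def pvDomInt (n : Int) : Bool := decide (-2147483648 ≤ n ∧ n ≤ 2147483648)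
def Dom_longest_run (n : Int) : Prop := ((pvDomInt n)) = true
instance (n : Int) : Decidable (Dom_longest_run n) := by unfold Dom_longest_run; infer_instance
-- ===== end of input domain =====

-- B replaces A's bit-by-bit scan with result/current accumulators by the AND-shift trick
-- (repeat n &= n >> 1, counting iterations until n = 0); same cost class, different algorithm.

-- ===== PORT A =====
-- while n > 0: if n % 2 == 1: current += 1 else: result = max(result, current); current = 0; n //= 2
def longestRunLoopA (n result current : Int) : Int :=
  if h : 0 < n then
    if PySem.Int.mod n 2 = 1 then
      longestRunLoopA (PySem.Int.floordiv n 2) result (current + 1)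
    else
      longestRunLoopA (PySem.Int.floordiv n 2) (max result current) 0
  else
    max result current
termination_by n.toNat
decreasing_by
  all_goals
    rw [PySem.Int.floordiv_eq_ediv_of_pos (by omega : (0:Int) < 2)]
    omega

def longest_run (n : Int) : Int := longestRunLoopA n 0 0

-- ===== PORT B =====
-- while n > 0: n &= n >> 1; count += 1
def longestRunLoopB (n count : Int) : Int :=
  if h : 0 < n then
    longestRunLoopB (PySem.Int.band n (n >>> (1 : Nat))) (count + 1)
  else
    count
termination_by n.toNat
decreasing_by
  have h2 : n = ((n.toNat : Nat) : Int) := (Int.toNat_of_nonneg (by omega)).symm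
  have hsh : ((n.toNat : Int) >>> (1 : Nat)) = ((n.toNat >>> 1 : Nat) : Int) := by
    simp [Int.natCast_shiftRight]
  rw [h2, hsh, PySem.Int.band_natCast]
  have hle : n.toNat &&& (n.toNat >>> 1) ≤ n.toNat >>> 1 := Nat.and_le_right
  simp only [Int.toNat_natCast]
  rw [Nat.shiftRight_one] at hle ⊢
  omega

def longest_run_alt (n : Int) : Int := longestRunLoopB n 0

-- ===== PRECONDITION & SPEC =====
def Spec_longest_run (n : Int) (out : Int) : Prop := out = longest_run_alt n
instance (n : Int) (out : Int) : Decidable (Spec_longest_run n out) := by unfold Spec_longest_run; infer_instance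

-- ===== CLAIM (what is proved, stated in full; the proofs are below) =====
def Claim_equal_longest_run : Prop := ∀ (n : Int), Dom_longest_run n → Spec_longest_run n (longest_run n)

-- ===== LEMMAS AND PROOFS =====

-- Nat model of A's loop without the `result` accumulator:
-- c is the length of the pending run of ones already consumed below bit 0.
def gN (m c : Nat) : Nat :=
  if m = 0 then c
  else if m % 2 = 1 then gN (m / 2) (c + 1)
  else max c (gN (m / 2) 0)
termination_by m
decreasing_by all_goals omega

-- hN m = m & (m >> 1) on Nat
def hN (m : Nat) : Nat := m &&& (m / 2)

-- Nat model of B's loop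
def cB (m : Nat) : Nat :=
  if m = 0 then 0 else cB (hN m) + 1
termination_by m
decreasing_by
  have : hN m ≤ m / 2 := Nat.and_le_right
  omega

theorem gN_zero (c : Nat) : gN 0 c = c := by rw [gN]; simp

theorem gN_odd (a c : Nat) : gN (2 * a + 1) c = gN a (c + 1) := by
  rw [gN]
  have h1 : (2 * a + 1) % 2 = 1 := by omega
  have h2 : (2 * a + 1) / 2 = a := by omega
  simp [h1, h2]

theorem gN_even (a c : Nat) (ha : a ≠ 0) : gN (2 * a) c = max c (gN a 0) := by
  rw [gN]
  have h1 : ¬ ((2 * a) % 2 = 1) := by omega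
  have h2 : (2 * a) / 2 = a := by omega
  have h3 : ¬ (2 * a = 0) := by omega
  rw [if_neg h3, if_neg h1, h2]

theorem gN_pos (m : Nat) (c : Nat) (hm : m ≠ 0) : 1 ≤ gN m c := by
  induction m using Nat.strong_induction_on generalizing c with
  | _ m ih =>
    rw [gN, if_neg hm]
    by_cases hp : m % 2 = 1
    · rw [if_pos hp]
      by_cases h2 : m / 2 = 0
      · rw [h2, gN_zero]; omega
      · exact ih (m / 2) (by omega) (c + 1) h2
    · rw [if_neg hp]
      have h2 : m / 2 ≠ 0 := by omega
      have := ih (m / 2) (by omega) 0 h2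
      omega

theorem testBit_two_mul (x : Nat) (i : Nat) : (2 * x).testBit (i + 1) = x.testBit i := by
  rw [Nat.testBit_succ]
  congr 1
  omega

theorem hN_even (a : Nat) : hN (2 * a) = 2 * hN a := by
  apply Nat.eq_of_testBit_eq
  intro i
  cases i with
  | zero =>
    rw [hN, Nat.testBit_and, show (2 * a) / 2 = a from by omega,
        Nat.testBit_zero, Nat.testBit_zero, Nat.testBit_zero]
    have h0 : (2 * a) % 2 = 0 := by omega
    have h1 : 2 * hN a % 2 = 0 := by omega
    rw [h0, h1]
    simp
  | succ i =>
    rw [hN, hN, Nat.testBit_and, show (2 * a) / 2 = a from by omega,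
        testBit_two_mul, testBit_two_mul, Nat.testBit_succ, Nat.testBit_and]

theorem hN_odd (a : Nat) : hN (2 * a + 1) = 2 * hN a + a % 2 := by
  apply Nat.eq_of_testBit_eq
  intro i
  cases i with
  | zero =>
    rw [hN, Nat.testBit_and, show (2 * a + 1) / 2 = a from by omega,
        Nat.testBit_zero, Nat.testBit_zero, Nat.testBit_zero]
    have h0 : (2 * a + 1) % 2 = 1 := by omega
    have h1 : (2 * hN a + a % 2) % 2 = a % 2 := by omega
    rw [h0, h1]
    simp
  | succ i =>
    rw [hN, hN, Nat.testBit_and, show (2 * a + 1) / 2 = a from by omega,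
        show 2 * a + 1 = 2 * a + 1 from rfl]
    have e1 : (2 * a + 1).testBit (i + 1) = a.testBit i := by
      rw [Nat.testBit_succ]
      congr 1
      omega
    have e2 : (2 * (a &&& a / 2) + a % 2).testBit (i + 1) = (a &&& a / 2).testBit i := by
      rw [Nat.testBit_succ]
      congr 1
      omega
    rw [e1, e2, Nat.testBit_succ, Nat.testBit_and]

-- Key invariant: one AND-shift step shortens the longest run by exactly one.
theorem key (m : Nat) :
    (∀ c, gN (2 * hN m + m % 2) c = gN m (c + 1) - 1) ∧
    (m ≠ 0 → gN (hN m) 0 = gN m 0 - 1) := by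
  induction m using Nat.strong_induction_on with
  | _ m ih =>
    rcases Nat.even_or_odd m with ⟨b, hb⟩ | ⟨b, hb⟩
    · -- m = 2 * b
      have hb' : m = 2 * b := by omega
      subst hb'
      by_cases hb0 : b = 0
      · subst hb0
        refine ⟨fun c => ?_, fun h => by omega⟩
        simp [hN, gN_zero]
      · have ihb := ih b (by omega)
        have hb1 : 1 ≤ gN b 0 := gN_pos b 0 hb0
        have hM := ihb.2 hb0
        have hmod : 2 * b % 2 = 0 := by omega
        constructor
        · intro c
          rw [hmod, Nat.add_zero, hN_even, gN_even b (c + 1) hb0]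
          by_cases hh : hN b = 0
          · have hone : gN b 0 = 1 := by
              rw [hh, gN_zero] at hM; omega
            rw [hh]
            rw [show 2 * (2 * (0:Nat)) = 0 from by omega, gN_zero, hone]
            omega
          · rw [gN_even (2 * hN b) c (by omega), gN_even (hN b) 0 hh]
            omega
        · intro _
          rw [hN_even, gN_even b 0 hb0]
          by_cases hh : hN b = 0
          · have hone : gN b 0 = 1 := by
              rw [hh, gN_zero] at hM; omega
            rw [hh, show 2 * (0:Nat) = 0 from by omega, gN_zero, hone]
            omega
          · rw [gN_even (hN b) 0 hh]
            omega
    · -- m = 2 * b + 1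
      subst hb
      have ihb := ih b (by omega)
      have hmod : (2 * b + 1) % 2 = 1 := by omega
      constructor
      · intro c
        rw [hmod, hN_odd, gN_odd (2 * hN b + b % 2) c, ihb.1 (c + 1), gN_odd b (c + 1)]
      · intro _
        rw [hN_odd, ihb.1 0, gN_odd b 0]

theorem cB_eq (m : Nat) : cB m = gN m 0 := by
  induction m using Nat.strong_induction_on with
  | _ m ih =>
    by_cases hm : m = 0
    · subst hm
      rw [cB, gN_zero]
      simp
    · rw [cB, if_neg hm]
      have hlt : hN m < m := by
        have : hN m ≤ m / 2 := Nat.and_le_right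
        omega
      rw [ih (hN m) hlt, (key m).2 hm]
      have := gN_pos m 0 hm
      omega

-- Bridges from the Int loops to the Nat models.

theorem loopA_eq (m r c : Nat) :
    longestRunLoopA (m : Int) (r : Int) (c : Int) = ((max r (gN m c) : Nat) : Int) := by
  induction m using Nat.strong_induction_on generalizing r c with
  | _ m ih =>
    by_cases hm : m = 0
    · subst hm
      rw [longestRunLoopA.eq_def, dif_neg (by omega : ¬ (0:Int) < ((0:Nat):Int)), gN_zero]
      simp [Nat.cast_max]
    · rw [longestRunLoopA.eq_def]
      have hpos : (0 : Int) < (m : Int) := by exact_mod_cast Nat.pos_of_ne_zero hm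
      rw [dif_pos hpos]
      have hmod : PySem.Int.mod (m : Int) 2 = ((m % 2 : Nat) : Int) := by
        exact_mod_cast PySem.Int.mod_natCast m 2
      have hdiv : PySem.Int.floordiv (m : Int) 2 = ((m / 2 : Nat) : Int) := by
        exact_mod_cast PySem.Int.floordiv_natCast m 2
      rw [hmod, hdiv]
      by_cases hp : m % 2 = 1
      · rw [if_pos (by exact_mod_cast congrArg (Nat.cast : Nat → Int) hp)]
        rw [show ((c : Int) + 1) = ((c + 1 : Nat) : Int) from by push_cast; ring]
        rw [ih (m / 2) (by omega) r (c + 1)]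
        conv_rhs => rw [gN, if_neg hm, if_pos hp]
      · rw [if_neg (fun hcon => hp (by exact_mod_cast hcon))]
        rw [show max (r : Int) (c : Int) = ((max r c : Nat) : Int) from by simp [Nat.cast_max]]
        rw [show ((0:Int)) = ((0 : Nat) : Int) from rfl]
        rw [ih (m / 2) (by omega) (max r c) 0]
        conv_rhs => rw [gN, if_neg hm, if_neg hp]
        congr 1
        omega

theorem loopB_eq (m c : Nat) :
    longestRunLoopB (m : Int) (c : Int) = ((c + cB m : Nat) : Int) := by
  induction m using Nat.strong_induction_on generalizing c with
  | _ m ih =>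
    by_cases hm : m = 0
    · subst hm
      rw [longestRunLoopB.eq_def, dif_neg (by omega : ¬ (0:Int) < ((0:Nat):Int)), cB]
      simp
    · rw [longestRunLoopB.eq_def]
      have hpos : (0 : Int) < (m : Int) := by exact_mod_cast Nat.pos_of_ne_zero hm
      rw [dif_pos hpos]
      have hsh : ((m : Int) >>> (1 : Nat)) = ((m >>> 1 : Nat) : Int) := by
        simp [Int.natCast_shiftRight]
      rw [hsh, PySem.Int.band_natCast]
      have hlt : m &&& m >>> 1 < m := by
        have h1 : m &&& m >>> 1 ≤ m >>> 1 := Nat.and_le_right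
        rw [Nat.shiftRight_one] at h1 ⊢
        omega
      rw [show ((c : Int) + 1) = ((c + 1 : Nat) : Int) from by push_cast; ring]
      rw [ih (m &&& m >>> 1) hlt (c + 1)]
      conv_rhs => rw [cB, if_neg hm]
      rw [show hN m = m &&& m >>> 1 from by rw [hN, Nat.shiftRight_one]]
      congr 1
      omega

-- ===== VERDICT (by name: the statement is the Claim_ definition above) =====
theorem longest_run_spec : Claim_equal_longest_run := by
  intro n _
  unfold Spec_longest_run longest_run longest_run_alt
  by_cases hn : 0 < n
  · have hrep : n = ((n.toNat : Nat) : Int) := (Int.toNat_of_nonneg (by omega)).symm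
    rw [hrep, show ((0:Int)) = ((0 : Nat) : Int) from rfl, loopA_eq, loopB_eq, cB_eq]
    simp
  · rw [longestRunLoopA.eq_def, longestRunLoopB.eq_def, dif_neg hn, dif_neg hn]
    simp
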